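-- pv_equiv track=rewrite | github.com/regi-a11/GG33-Numerology-Calculator | main.py | find_dates
-- ===== SOURCE A (Python) =====
-- def sum_of_digits(n):
--   # Check if the number is a master number
--   if n in [11, 22, 33]:
--     return n
--   s = 0
--   while n > 0:
--     s += n % 10
--     n //= 10
--   return s
--
-- def is_valid_date(d, m, y):
--   # Check if the year is in the range of 2000 to 2100
--   if y < 2000 or y > 2100:
--     return False
--   # Check if the month is in the range of 1 to 12
--   if m < 1 or m > 12:
--     return False
--   # Check the number of days in each month
--   days_in_month = [31, 28, 31, 30, 31, 30, 31, 31, 30, 31, 30, 31]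
--   # Check for leap year
--   if y % 4 == 0 and (y % 100 != 0 or y % 400 == 0):
--     days_in_month[1] = 29
--   # Check if the day is in the frange of 1 to the number of days in the month
--   if d < 1 or d > days_in_month[m - 1]:
--     return False
--   # If all the conditions are satisfied, return True
--   return True
--
-- def find_dates(sum):
--   # Create an empty list to store the dates
--   dates = []
--   # Loop through all the possible years from 2000 to 2100
--   for y in range(2000, 2101):
--     # Loop through all the possible months from 1 to 12
--     for m in range(1, 13):
--       # Loop through all the possible days from 1 to 31
--       for d in range(1, 32):
--         # Check if the date is valid
--         if is_valid_date(d, m, y):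
--           # Check if the sum of digits of the date is equal to the given sum
--           if sum_of_digits(d) + sum_of_digits(m) + sum_of_digits(y) == sum:
--             # Convert the date to a string in the format of DD MM YYYY
--             date = f"{d:02d} {m:02d} {y:04d}"
--             # Check if the date has any master number in it
--             if d in [11, 22, 33] or m in [11, 22, 33] or y in [11, 22, 33]:
--               # Highlight the date with asterisks
--               date = f"**{date}**"
--             # Append the date to the list
--             dates.append(date)
--   # Return the list of dates
--   return dates
-- ===== SOURCE B (Python) =====
-- def sum_of_digits(n):
--   # Check if the number is a master number
--   if n in [11, 22, 33]:
--     return n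
--   s = 0
--   while n > 0:
--     s += n % 10
--     n //= 10
--   return s
--
-- def days_in(y, m):
--   if m == 2:
--     return 29 if (y % 4 == 0 and (y % 100 != 0 or y % 400 == 0)) else 28
--   if m in (4, 6, 9, 11):
--     return 30
--   return 31
--
-- def find_dates(sum):
--   dates = []
--   # single calendar cursor walking day by day from 2000-01-01 through 2100-12-31
--   y, m, d = 2000, 1, 1
--   while y <= 2100:
--     if sum_of_digits(d) + sum_of_digits(m) + sum_of_digits(y) == sum:
--       date = f"{d:02d} {m:02d} {y:04d}"
--       if d in [11, 22, 33] or m in [11, 22, 33] or y in [11, 22, 33]: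
--         date = f"**{date}**"
--       dates.append(date)
--     # advance the cursor one day
--     if d < days_in(y, m):
--       d += 1
--     elif m < 12:
--       m, d = m + 1, 1
--     else:
--       y, m, d = y + 1, 1, 1
--   return dates
-- ===== Notes on version B (the rewrite author's own statement) =====
-- stated objective: alternative
-- what changed: Replaces the triple nested year/month/day loop that tests every candidate day slot with is_valid_date by a single calendar cursor that steps day by day across the supported century, so the validity check disappears entirely.
import Mathlib
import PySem

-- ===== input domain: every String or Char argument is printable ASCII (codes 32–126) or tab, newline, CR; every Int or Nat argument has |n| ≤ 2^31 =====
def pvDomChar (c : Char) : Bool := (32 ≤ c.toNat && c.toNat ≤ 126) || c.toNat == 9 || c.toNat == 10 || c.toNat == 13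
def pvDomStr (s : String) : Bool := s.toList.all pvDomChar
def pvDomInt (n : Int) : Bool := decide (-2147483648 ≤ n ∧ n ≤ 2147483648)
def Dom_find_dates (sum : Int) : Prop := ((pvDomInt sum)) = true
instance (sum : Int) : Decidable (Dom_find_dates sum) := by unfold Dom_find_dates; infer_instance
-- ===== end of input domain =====

-- B replaces A's triple nested year/month/day loop (with its per-candidate validity
-- check) by a single calendar cursor stepping day by day; objective: alternative
-- decomposition, same return value.


-- ===== PORT A =====
-- shared helper of the Python module (both A and B call it, as in Python)
-- the 'while n > 0: s += n % 10; n //= 10' loop of sum_of_digits; the fuel n.toNat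
-- bounds the iteration count (n shrinks by a factor 10 per step), so it never runs out
def sodLoop : Nat → Int → Int → Int
  | 0, _, s => s
  | Nat.succ f, n, s =>
    if 0 < n then sodLoop f (PySem.Int.floordiv n 10) (s + PySem.Int.mod n 10) else s

def sum_of_digits (n : Int) : Int :=
  if n = 11 ∨ n = 22 ∨ n = 33 then n else sodLoop n.toNat n 0

-- f"{n:0wd}" for 0 ≤ n (the only values formatted here); exact on that domain
def pad (w : Nat) (n : Int) : String :=
  let s := PySem.Int.toChars n
  String.ofList (List.replicate (w - s.length) '0' ++ s)

-- the date string both Python functions build: f"{d:02d} {m:02d} {y:04d}",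
-- wrapped in '**' when d, m or y is a master number (identical code in A and B)
def fmtDate (d m y : Int) : String :=
  let date := pad 2 d ++ " " ++ pad 2 m ++ " " ++ pad 4 y
  if d = 11 ∨ d = 22 ∨ d = 33 ∨ m = 11 ∨ m = 22 ∨ m = 33 ∨ y = 11 ∨ y = 22 ∨ y = 33 then
    "**" ++ date ++ "**"
  else date

def is_valid_date (d m y : Int) : Bool :=
  if y < 2000 ∨ y > 2100 then false
  else if m < 1 ∨ m > 12 then false
  else
    let dim : List Int := [31, 28, 31, 30, 31, 30, 31, 31, 30, 31, 30, 31]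
    -- days_in_month[1] = 29 on leap years
    let dim := if PySem.Int.mod y 4 = 0 ∧ (PySem.Int.mod y 100 ≠ 0 ∨ PySem.Int.mod y 400 = 0)
               then dim.set 1 29 else dim
    -- index m - 1 is in range because 1 ≤ m ≤ 12 here
    if d < 1 ∨ d > (PySem.List.pyGet? dim (m - 1)).getD 0 then false
    else true

def find_dates (sum : Int) : List String :=
  (PySem.List.pyRange 2000 2101 1).foldl (fun dates y =>
    (PySem.List.pyRange 1 13 1).foldl (fun dates m =>
      (PySem.List.pyRange 1 32 1).foldl (fun dates d =>
        if is_valid_date d m y then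
          if sum_of_digits d + sum_of_digits m + sum_of_digits y = sum then
            dates ++ [fmtDate d m y]
          else dates
        else dates) dates) dates) []

-- ===== PORT B =====
def days_in (y m : Int) : Int :=
  if m = 2 then
    if PySem.Int.mod y 4 = 0 ∧ (PySem.Int.mod y 100 ≠ 0 ∨ PySem.Int.mod y 400 = 0) then 29 else 28
  else if m = 4 ∨ m = 6 ∨ m = 9 ∨ m = 11 then 30
  else 31

-- B's 'while y <= 2100' cursor loop, with a fuel counter of one unit per iteration
-- (the walk takes 36890 iterations, so fuel 200000 never runs out)
def bLoop : Nat → Int → Int → Int → Int → List String → List String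
  | 0, _, _, _, _, acc => acc
  | Nat.succ f, sum, y, m, d, acc =>
    if y ≤ 2100 then
      let acc' := if sum_of_digits d + sum_of_digits m + sum_of_digits y = sum then
          acc ++ [fmtDate d m y]
        else acc
      if d < days_in y m then bLoop f sum y m (d + 1) acc'
      else if m < 12 then bLoop f sum y (m + 1) 1 acc'
      else bLoop f sum (y + 1) 1 1 acc'
    else acc

def find_dates_alt (sum : Int) : List String :=
  bLoop 200000 sum 2000 1 1 []

-- ===== PRECONDITION & SPEC =====
def Spec_find_dates (sum : Int) (out : List String) : Prop := out = find_dates_alt sum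
instance (sum : Int) (out : List String) : Decidable (Spec_find_dates sum out) := by unfold Spec_find_dates; infer_instance

-- ===== CLAIM (what is proved, stated in full; the proofs are below) =====
def Claim_equal_find_dates : Prop := ∀ (sum : Int), Dom_find_dates sum → Spec_find_dates sum (find_dates sum)

-- ===== LEMMAS AND PROOFS =====

-- the common per-date step: both programs append the same string under the same test
def dateStep (sum : Int) (acc : List String) (t : Int × Int × Int) : List String :=
  if sum_of_digits t.2.2 + sum_of_digits t.2.1 + sum_of_digits t.1 = sum then
    acc ++ [fmtDate t.2.2 t.2.1 t.1]
  else acc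

theorem days_in_le (y m : Int) : days_in y m ≤ 31 := by
  unfold days_in; split_ifs <;> norm_num

theorem days_in_ge (y m : Int) : 28 ≤ days_in y m := by
  unfold days_in; split_ifs <;> norm_num

-- the (y, m, d) triples B's cursor visits, generated by the same recursion as bLoop
def walk (y m d : Int) : List (Int × Int × Int) :=
  if y ≤ 2100 then
    (y, m, d) ::
      (if d < days_in y m then walk y m (d + 1)
       else if m < 12 then walk y (m + 1) 1
       else walk (y + 1) 1 1)
  else []
  termination_by ((2101 - y).toNat * 1000 + (13 - m).toNat * 50 + (days_in y m - d).toNat)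
  decreasing_by
  · omega
  · have h1 := days_in_le y (m + 1); have h2 := days_in_ge y (m + 1); omega
  · have h1 := days_in_le (y + 1) 1; have h2 := days_in_ge (y + 1) 1; omega

def monthOf (y m : Int) : List (Int × Int × Int) :=
  (PySem.List.pyRange 1 (days_in y m + 1) 1).map (fun d => (y, m, d))

theorem walk_month (y m : Int) (hy2 : y ≤ 2100) :
    ∀ d, 1 ≤ d → d ≤ days_in y m →
    walk y m d = (PySem.List.pyRange d (days_in y m + 1) 1).map (fun dd => (y, m, dd)) ++
      (if m < 12 then walk y (m + 1) 1 else walk (y + 1) 1 1) := by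
  intro d hd1 hdL
  generalize hgen : (days_in y m - d).toNat = k at *
  induction k generalizing d with
  | zero =>
    rw [walk, if_pos hy2, if_neg (by omega)]
    rw [PySem.List.pyRange_one_cons (by omega)]
    rw [PySem.List.pyRange_one_eq_nil (by omega)]
    simp
  | succ k ih =>
    rw [walk, if_pos hy2, if_pos (by omega)]
    rw [PySem.List.pyRange_one_cons (by omega)]
    rw [ih (d + 1) (by omega) (by omega) (by omega)]
    simp

theorem walk_months (y : Int) (hy2 : y ≤ 2100) :
    ∀ m, 1 ≤ m → m ≤ 12 →
    walk y m 1 = (PySem.List.pyRange m 13 1).flatMap (monthOf y) ++ walk (y + 1) 1 1 := by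
  intro m hm1 hm2
  generalize hgen : (12 - m).toNat = k at *
  induction k generalizing m with
  | zero =>
    have : m = 12 := by omega
    subst this
    rw [walk_month y 12 hy2 1 (by norm_num) (by have := days_in_ge y 12; omega), if_neg (by norm_num)]
    rw [PySem.List.pyRange_one_cons (show (12:Int) < 13 by norm_num)]
    simp [monthOf, PySem.List.pyRange_one_eq_nil]
  | succ k ih =>
    rw [walk_month y m hy2 1 (by norm_num) (by have := days_in_ge y m; omega), if_pos (by omega)]
    rw [ih (m + 1) (by omega) (by omega) (by omega)]
    rw [PySem.List.pyRange_one_cons (show m < 13 by omega)]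
    simp [monthOf]

theorem walk_years :
    ∀ y, 2000 ≤ y → y ≤ 2101 →
    walk y 1 1 = (PySem.List.pyRange y 2101 1).flatMap
      (fun yy => (PySem.List.pyRange 1 13 1).flatMap (monthOf yy)) := by
  intro y hy1 hy2
  generalize hgen : (2101 - y).toNat = k at *
  induction k generalizing y with
  | zero =>
    have : y = 2101 := by omega
    subst this
    rw [walk, if_neg (by norm_num), PySem.List.pyRange_one_eq_nil (show (2101:Int) ≤ 2101 by norm_num)]
    rfl
  | succ k ih =>
    rw [walk_months y (by omega) 1 (by norm_num) (by norm_num)]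
    rw [ih (y + 1) (by omega) (by omega) (by omega)]
    rw [PySem.List.pyRange_one_cons (show y < 2101 by omega)]
    rw [List.flatMap_cons]

set_option maxHeartbeats 2000000 in
theorem valid_eq (y m d : Int) (hy1 : 2000 ≤ y) (hy2 : y ≤ 2100) (hm1 : 1 ≤ m) (hm2 : m ≤ 12) :
    is_valid_date d m y = decide (1 ≤ d ∧ d ≤ days_in y m) := by
  unfold is_valid_date days_in
  rw [if_neg (show ¬(y < 2000 ∨ y > 2100) by omega)]
  interval_cases m <;> split_ifs <;>
    simp [PySem.List.pyGet?, PySem.List.pyIdx?] <;>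
    (first | omega | (rw [Bool.eq_iff_iff]; simp; try omega))

theorem filter_valid (y m : Int) (hy1 : 2000 ≤ y) (hy2 : y ≤ 2100) (hm1 : 1 ≤ m) (hm2 : m ≤ 12) :
    (PySem.List.pyRange 1 32 1).filter (fun d => is_valid_date d m y) =
      PySem.List.pyRange 1 (days_in y m + 1) 1 := by
  rw [List.filter_congr (fun d _ => valid_eq y m d hy1 hy2 hm1 hm2)]
  have h28 := days_in_ge y m
  have h31 := days_in_le y m
  generalize days_in y m = L at *
  interval_cases L <;> decide

-- A's triple loop reaches exactly the triples B's cursor walks through, in the same order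
theorem triplesA_eq :
    (PySem.List.pyRange 2000 2101 1).flatMap (fun y =>
      (PySem.List.pyRange 1 13 1).flatMap (fun m =>
        ((PySem.List.pyRange 1 32 1).filter (fun d => is_valid_date d m y)).map
          (fun d => (y, m, d)))) = walk 2000 1 1 := by
  rw [walk_years 2000 (le_refl _) (by norm_num)]
  apply List.flatMap_congr
  intro y hy
  obtain ⟨hy1, hy2⟩ := PySem.List.mem_pyRange_one.mp hy
  apply List.flatMap_congr
  intro m hm
  obtain ⟨hm1, hm2⟩ := PySem.List.mem_pyRange_one.mp hm
  rw [filter_valid y m hy1 (by omega) hm1 (by omega)]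
  rfl

theorem foldl_flatMap {α β γ : Type} (g : α → List β) (f : γ → β → γ) (l : List α) (init : γ) :
    (l.flatMap g).foldl f init = l.foldl (fun acc x => (g x).foldl f acc) init := by
  induction l generalizing init with
  | nil => rfl
  | cons a l ih => simp [List.flatMap_cons, List.foldl_append, ih]

theorem A_char (sum : Int) :
    find_dates sum =
      ((PySem.List.pyRange 2000 2101 1).flatMap (fun y =>
        (PySem.List.pyRange 1 13 1).flatMap (fun m =>
          ((PySem.List.pyRange 1 32 1).filter (fun d => is_valid_date d m y)).map
            (fun d => (y, m, d))))).foldl (dateStep sum) [] := by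
  unfold find_dates
  rw [foldl_flatMap]
  congr 1
  funext acc y
  rw [foldl_flatMap]
  congr 1
  funext acc m
  rw [List.foldl_map, List.foldl_filter]
  rfl

-- with fuel at least the walk's termination measure, bLoop folds dateStep over walk
set_option maxRecDepth 4096 in
theorem B_char (sum : Int) :
    ∀ (fuel : Nat) (y m d : Int) (acc : List String),
      (2101 - y).toNat * 1000 + (13 - m).toNat * 50 + (days_in y m - d).toNat ≤ fuel →
      bLoop fuel sum y m d acc = (walk y m d).foldl (dateStep sum) acc := by
  intro fuel
  induction fuel with
  | zero =>
    intro y m d acc hle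
    rw [bLoop, walk, if_neg (by omega)]
    rfl
  | succ f ih =>
    intro y m d acc hle
    rw [bLoop, walk]
    by_cases hy : y ≤ 2100
    · rw [if_pos hy, if_pos hy]
      by_cases hd : d < days_in y m
      · rw [if_pos hd, if_pos hd, ih y m (d + 1) _ (by omega)]
        rfl
      · by_cases hm : m < 12
        · rw [if_neg hd, if_neg hd, if_pos hm, if_pos hm,
              ih y (m + 1) 1 _ (by have h1 := days_in_le y (m + 1); have h2 := days_in_ge y (m + 1); omega)]
          rfl
        · rw [if_neg hd, if_neg hd, if_neg hm, if_neg hm,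
              ih (y + 1) 1 1 _ (by have h1 := days_in_le (y + 1) 1; have h2 := days_in_ge (y + 1) 1; omega)]
          rfl
    · rw [if_neg hy, if_neg hy]
      rfl

-- ===== VERDICT (by name: the statement is the Claim_ definition above) =====
theorem find_dates_spec : Claim_equal_find_dates := by
  intro sum _
  unfold Spec_find_dates find_dates_alt
  rw [A_char, triplesA_eq, B_char sum 200000 2000 1 1 [] (by decide)]
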